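-- pv_equiv track=rewrite | github.com/aLexzzz430/Cognitive-OS | modules/world_model/intervention_targets.py | _generic_actions_from_families
-- ===== SOURCE A (Python) =====
-- from typing import Any, Dict, Iterable, List, Optional, Sequence, Tuple
--
-- def _generic_actions_from_families(families: Sequence[str]) -> List[str]:
--     mapped: List[str] = []
--     for raw in families:
--         family = str(raw or "").strip()
--         if not family:
--             continue
--         if family == "pointer_interaction":
--             for name in ("pointer_select", "pointer_activate"):
--                 if name not in mapped:
--                     mapped.append(name)
--         elif family == "navigation_interaction":
--             if "navigate_focus" not in mapped:
--                 mapped.append("navigate_focus")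
--         elif family == "confirm_interaction":
--             if "confirm" not in mapped:
--                 mapped.append("confirm")
--         elif family == "state_transform_interaction":
--             if "probe_relation" not in mapped:
--                 mapped.append("probe_relation")
--     return mapped
-- ===== SOURCE B (Python) =====
-- _ACTION_ROWS = (
--     ("pointer_interaction", 0, "pointer_select"),
--     ("pointer_interaction", 1, "pointer_activate"),
--     ("navigation_interaction", 0, "navigate_focus"),
--     ("confirm_interaction", 0, "confirm"),
--     ("state_transform_interaction", 0, "probe_relation"),
-- )
--
-- def _generic_actions_from_families(families):
--     # Invert the loop: for each known action, find the first occurrence of its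
--     # family among the normalized inputs, then emit actions sorted by that
--     # first-occurrence rank (2*index + offset keeps a family's actions in order).
--     norm = [str(raw or "").strip() for raw in families]
--     keyed = []
--     for family, offset, action in _ACTION_ROWS:
--         if family in norm:
--             keyed.append((2 * norm.index(family) + offset, action))
--     keyed.sort(key=lambda pair: pair[0])
--     return [action for _, action in keyed]
-- ===== Notes on version B (the rewrite author's own statement) =====
-- stated objective: alternative
-- what changed: Inverts the iteration: instead of streaming over families and appending actions with membership checks, B scans per action for the first occurrence of its family in the normalized list, builds (2*index+offset, action) pairs, and sorts by that rank to recover first-occurrence order.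
import Mathlib
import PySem

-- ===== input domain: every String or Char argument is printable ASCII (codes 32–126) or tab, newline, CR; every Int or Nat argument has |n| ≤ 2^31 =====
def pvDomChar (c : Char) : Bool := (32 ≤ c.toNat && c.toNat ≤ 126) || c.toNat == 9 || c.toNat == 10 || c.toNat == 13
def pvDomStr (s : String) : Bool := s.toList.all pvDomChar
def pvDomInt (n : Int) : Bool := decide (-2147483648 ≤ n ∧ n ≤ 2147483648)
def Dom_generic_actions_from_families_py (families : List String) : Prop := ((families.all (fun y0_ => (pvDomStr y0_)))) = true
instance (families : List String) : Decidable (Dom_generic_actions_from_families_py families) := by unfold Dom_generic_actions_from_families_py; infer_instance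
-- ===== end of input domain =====

-- B inverts the iteration: a per-action scan for the first occurrence of its family,
-- then a sort by first-occurrence rank, instead of A's streaming branch-and-membership appends.

-- ===== PORT A =====
-- str(raw or "").strip()  (shared normalization expression of both Pythons)
def pvNorm (raw : String) : String := PySem.Str.strip (if raw == "" then "" else raw)

-- one iteration of A's loop body, acting on the accumulator `mapped`
def pvStepA (mapped : List String) (raw : String) : List String :=
  let family := pvNorm raw
  if family == "" then mapped
  else if family == "pointer_interaction" then
    ["pointer_select", "pointer_activate"].foldl
      (fun m name => if m.contains name then m else m ++ [name]) mapped
  else if family == "navigation_interaction" then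
    if mapped.contains "navigate_focus" then mapped else mapped ++ ["navigate_focus"]
  else if family == "confirm_interaction" then
    if mapped.contains "confirm" then mapped else mapped ++ ["confirm"]
  else if family == "state_transform_interaction" then
    if mapped.contains "probe_relation" then mapped else mapped ++ ["probe_relation"]
  else mapped

def generic_actions_from_families_py (families : List String) : List String :=
  families.foldl pvStepA []

-- ===== PORT B =====
-- the module-level table _ACTION_ROWS: (family, offset, action)
def pvRows : List (String × Nat × String) :=
  [("pointer_interaction", 0, "pointer_select"),
   ("pointer_interaction", 1, "pointer_activate"),
   ("navigation_interaction", 0, "navigate_focus"),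
   ("confirm_interaction", 0, "confirm"),
   ("state_transform_interaction", 0, "probe_relation")]

def generic_actions_from_families_py_alt (families : List String) : List String :=
  let norm := families.map pvNorm
  let keyed := pvRows.foldl
    (fun acc r =>
      if norm.contains r.1 then
        acc ++ [(2 * (PySem.List.index? norm r.1).getD 0 + r.2.1, r.2.2)]
      else acc) ([] : List (Nat × String))
  (PySem.List.sorted keyed (fun p => p.1) false).map Prod.snd

-- ===== PRECONDITION & SPEC =====
def Spec_generic_actions_from_families_py (families : List String) (out : List String) : Prop := out = generic_actions_from_families_py_alt families
instance (families : List String) (out : List String) : Decidable (Spec_generic_actions_from_families_py families out) := by unfold Spec_generic_actions_from_families_py; infer_instance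

-- ===== CLAIM (what is proved, stated in full; the proofs are below) =====
def Claim_equal_generic_actions_from_families_py : Prop := ∀ (families : List String), Dom_generic_actions_from_families_py families → Spec_generic_actions_from_families_py families (generic_actions_from_families_py families)

-- ===== LEMMAS AND PROOFS =====

-- B's unsorted keyed list, as a filter-map over the table
def pvK (norm : List String) : List (Nat × String) :=
  (pvRows.filter (fun r => norm.contains r.1)).map
    (fun r => (2 * (PySem.List.index? norm r.1).getD 0 + r.2.1, r.2.2))

-- B's sorted keyed list for a given input
def pvS (fam : List String) : List (Nat × String) :=
  PySem.List.sorted (pvK (fam.map pvNorm)) (fun p => p.1) false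

lemma pvAlt_eq (fam : List String) :
    generic_actions_from_families_py_alt fam = (pvS fam).map Prod.snd := by
  unfold generic_actions_from_families_py_alt pvS pvK
  simp only [PySem.List.foldl_append_if, List.nil_append]

lemma pvFilterOrPerm {α : Type} (p q : α → Bool) (l : List α)
    (h : ∀ x ∈ l, ¬(p x = true ∧ q x = true)) :
    (l.filter (fun x => p x || q x)).Perm (l.filter p ++ l.filter q) := by
  induction l with
  | nil => simp
  | cons a t ih =>
    have ht : ∀ x ∈ t, ¬(p x = true ∧ q x = true) := fun x hx => h x (List.mem_cons_of_mem _ hx)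
    by_cases hp : p a = true
    · have hq : q a = false := by
        cases hq' : q a
        · rfl
        · exact absurd ⟨hp, hq'⟩ (h a List.mem_cons_self)
      simp only [List.filter_cons, hp, hq, Bool.true_or, cond_true]
      simpa using (ih ht).cons a
    · have hp' : p a = false := by simpa using hp
      by_cases hq : q a = true
      · simp only [List.filter_cons, hp', hq, Bool.false_or, cond_true, cond_false]
        exact ((ih ht).cons a).trans List.perm_middle.symm
      · have hq' : q a = false := by simpa using hq
        simp only [List.filter_cons, hp', hq', Bool.false_or, cond_false]
        exact ih ht

lemma pvK_unchanged (norm : List String) (n : String)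
    (h : ∀ r ∈ pvRows, r.1 = n → r.1 ∈ norm) :
    pvK (norm ++ [n]) = pvK norm := by
  unfold pvK
  have hfil : pvRows.filter (fun r => (norm ++ [n]).contains r.1)
      = pvRows.filter (fun r => norm.contains r.1) := by
    apply List.filter_congr
    intro r hr
    by_cases he : r.1 = n
    · have hm : r.1 ∈ norm := h r hr he
      simp [hm]
    · simp [List.mem_append, he]
  rw [hfil]
  apply List.map_congr_left
  intro r hr
  have hmem : r.1 ∈ norm := by simpa using (List.mem_filter.mp hr).2
  rw [PySem.List.index?_append_of_mem _ hmem]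

lemma pvK_new (norm : List String) (n : String) (hn : n ∉ norm) :
    (pvK (norm ++ [n])).Perm
      (pvK norm ++ (pvRows.filter (fun r => r.1 == n)).map
        (fun r => (2 * norm.length + r.2.1, r.2.2))) := by
  unfold pvK
  have hfil : pvRows.filter (fun r => (norm ++ [n]).contains r.1)
      = pvRows.filter (fun r => norm.contains r.1 || r.1 == n) := by
    apply List.filter_congr
    intro r _
    by_cases he : r.1 = n <;> simp [List.mem_append, he]
  rw [hfil]
  have hdisj : ∀ r ∈ pvRows, ¬((norm.contains r.1) = true ∧ (r.1 == n) = true) := by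
    rintro r _ ⟨hc, he⟩
    have hm : r.1 ∈ norm := by simpa using hc
    exact hn (by rwa [eq_of_beq he] at hm)
  have hperm := (pvFilterOrPerm (fun r => norm.contains r.1) (fun r => r.1 == n) pvRows hdisj).map
    (fun r => (2 * (PySem.List.index? (norm ++ [n]) r.1).getD 0 + r.2.1, r.2.2))
  refine hperm.trans ?_
  rw [List.map_append]
  have e1 : (pvRows.filter (fun r => norm.contains r.1)).map
      (fun r => (2 * (PySem.List.index? (norm ++ [n]) r.1).getD 0 + r.2.1, r.2.2))
      = (pvRows.filter (fun r => norm.contains r.1)).map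
      (fun r => (2 * (PySem.List.index? norm r.1).getD 0 + r.2.1, r.2.2)) := by
    apply List.map_congr_left
    intro r hr
    have hmem : r.1 ∈ norm := by simpa using (List.mem_filter.mp hr).2
    rw [PySem.List.index?_append_of_mem _ hmem]
  have e2 : (pvRows.filter (fun r => r.1 == n)).map
      (fun r => (2 * (PySem.List.index? (norm ++ [n]) r.1).getD 0 + r.2.1, r.2.2))
      = (pvRows.filter (fun r => r.1 == n)).map
      (fun r => (2 * norm.length + r.2.1, r.2.2)) := by
    apply List.map_congr_left
    intro r hr
    have he : r.1 = n := eq_of_beq (by simpa using (List.mem_filter.mp hr).2)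
    rw [he, PySem.List.index?_append_singleton_self norm n hn]
    simp
  rw [e1, e2]

-- membership of an action in B's output ↔ its family has been seen (table rows determine this)
lemma pvMem (pre : List String) (f a : String) (off : Nat) (hr : (f, off, a) ∈ pvRows) :
    a ∈ (pvS pre).map Prod.snd ↔ f ∈ pre.map pvNorm := by
  have hperm := ((PySem.List.sorted_perm (pvK (pre.map pvNorm)) (fun p => p.1) false).map Prod.snd).mem_iff
    (a := a)
  rw [pvS, hperm]
  simp only [pvK, List.map_map, List.mem_map, List.mem_filter, Function.comp]
  constructor
  · rintro ⟨r, ⟨hr', hc⟩, ha⟩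
    fin_cases hr' <;> fin_cases hr <;> simp_all
  · intro hm
    exact ⟨(f, off, a), ⟨hr, by simpa using hm⟩, rfl⟩

-- when the incoming family is already seen (or is no family at all), B's state is unchanged
lemma pvS_unchanged (pre : List String) (c : String)
    (h : pvNorm c ∈ pre.map pvNorm ∨ ∀ r ∈ pvRows, r.1 ≠ pvNorm c) :
    pvS (pre ++ [c]) = pvS pre := by
  unfold pvS
  rw [List.map_append, List.map_singleton, pvK_unchanged]
  intro r hrr he
  rcases h with h | h
  · rwa [he]
  · exact absurd he (h r hrr)

-- keys in pvK norm are < 2 * norm.length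
lemma pvK_key_lt (norm : List String) :
    ∀ x ∈ pvK norm, x.1 < 2 * norm.length := by
  intro x hx
  unfold pvK at hx
  obtain ⟨r, hrf, hrx⟩ := List.mem_map.mp hx
  have hc : r.1 ∈ norm := by simpa using (List.mem_filter.mp hrf).2
  obtain ⟨i, hi⟩ := Option.isSome_iff_exists.mp ((PySem.List.index?_isSome_iff _ _).mpr hc)
  obtain ⟨hlt, -, -⟩ := PySem.List.getElem_of_index?_eq_some hi
  have hoff : r.2.1 ≤ 1 := by
    have hrm : r ∈ pvRows := (List.mem_filter.mp hrf).1
    fin_cases hrm <;> simp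
  have hd : (PySem.List.index? norm r.1).getD 0 = i := by rw [hi]; rfl
  rw [← hrx]
  simp only [hd]
  omega

-- when the incoming family is new, its actions are appended at the end of B's state
lemma pvS_new (pre : List String) (c : String)
    (hnotin : pvNorm c ∉ pre.map pvNorm)
    (invb : (pvS pre).Pairwise (fun a b => a.1 < b.1)) :
    pvS (pre ++ [c]) = pvS pre
      ++ (pvRows.filter (fun r => r.1 == pvNorm c)).map
        (fun r => (2 * pre.length + r.2.1, r.2.2)) := by
  have hlen : (pre.map pvNorm).length = pre.length := List.length_map _
  unfold pvS
  rw [List.map_append, List.map_singleton]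
  apply PySem.List.sorted_eq_of_perm_of_pairwise_lt
  · refine ((PySem.List.sorted_perm _ _ _).append_right _).trans ?_
    rw [← hlen]
    exact (pvK_new (pre.map pvNorm) (pvNorm c) hnotin).symm
  · rw [List.pairwise_append]
    refine ⟨invb, ?_, ?_⟩
    · -- the appended block is strictly increasing in key
      rcases List.filter_sublist (l := pvRows) (p := fun r => r.1 == pvNorm c) with hsub
      have hnd : (pvRows.filter (fun r => r.1 == pvNorm c)).Pairwise
          (fun r s => r.2.1 < s.2.1 ∨ r.1 ≠ s.1) := by
        apply List.Pairwise.sublist hsub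
        simp [pvRows]
      apply List.pairwise_map.mpr
      apply hnd.imp_of_mem
      intro r s hrm hsm hrs
      rcases hrs with hlt' | hne
      · omega
      · exact absurd ((eq_of_beq (by simpa using (List.mem_filter.mp hrm).2)).trans
          (eq_of_beq (by simpa using (List.mem_filter.mp hsm).2)).symm) hne
    · intro x hx y hy
      have hxk : x.1 < 2 * pre.length := by
        have := pvK_key_lt (pre.map pvNorm) x (((PySem.List.sorted_perm _ _ _)).mem_iff.mp hx)
        omega
      obtain ⟨r, -, hry⟩ := List.mem_map.mp hy
      rw [← hry]
      simp only
      omega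

-- the combined loop invariant, by induction on the family list from the right
lemma pvInv (fam : List String) :
    (pvS fam).map Prod.snd = fam.foldl pvStepA []
      ∧ (pvS fam).Pairwise (fun a b => a.1 < b.1) := by
  induction fam using List.reverseRecOn with
  | nil =>
    have hs : pvS ([] : List String) = [] := by
      simp [pvS, pvK, PySem.List.sorted_eq_nil_iff, pvRows]
    simp [hs]
  | append_singleton pre c ih =>
    obtain ⟨iha, ihb⟩ := ih
    have hfoldl : (pre ++ [c]).foldl pvStepA [] = pvStepA (pre.foldl pvStepA []) c := by
      simp [List.foldl_append]
    set n := pvNorm c with hn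
    by_cases h0 : n = "pointer_interaction" ∨ n = "navigation_interaction"
        ∨ n = "confirm_interaction" ∨ n = "state_transform_interaction"
    · -- a real family: seen or unseen
      by_cases hm : n ∈ pre.map pvNorm
      · -- already seen: B's state unchanged, A's membership checks all fire
        have hs : pvS (pre ++ [c]) = pvS pre := pvS_unchanged pre c (Or.inl hm)
        have hstep : pvStepA ((pvS pre).map Prod.snd) c = (pvS pre).map Prod.snd := by
          unfold pvStepA
          rw [← hn]
          rcases h0 with h1 | h1 | h1 | h1 <;> rw [h1] <;> rw [h1] at hm
          · have e1 := (pvMem pre _ _ 0 (by simp [pvRows] :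
                ("pointer_interaction", 0, "pointer_select") ∈ pvRows)).mpr hm
            have e2 := (pvMem pre _ _ 1 (by simp [pvRows] :
                ("pointer_interaction", 1, "pointer_activate") ∈ pvRows)).mpr hm
            simp [e1, e2]
          · have e1 := (pvMem pre _ _ 0 (by simp [pvRows] :
                ("navigation_interaction", 0, "navigate_focus") ∈ pvRows)).mpr hm
            simp [e1]
          · have e1 := (pvMem pre _ _ 0 (by simp [pvRows] :
                ("confirm_interaction", 0, "confirm") ∈ pvRows)).mpr hm
            simp [e1]
          · have e1 := (pvMem pre _ _ 0 (by simp [pvRows] :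
                ("state_transform_interaction", 0, "probe_relation") ∈ pvRows)).mpr hm
            simp [e1]
        exact ⟨by rw [hs, hfoldl, ← iha, hstep], by rw [hs]; exact ihb⟩
      · -- new family: B appends its actions at the end, and so does A
        have hs := pvS_new pre c hm ihb
        rw [← hn] at hs
        constructor
        · rw [hs, hfoldl, ← iha, List.map_append]
          unfold pvStepA
          rw [← hn]
          rcases h0 with h1 | h1 | h1 | h1 <;> rw [h1] at hs ⊢ <;> rw [h1] at hm
          · have e1 := (pvMem pre _ _ 0 (by simp [pvRows] :
                ("pointer_interaction", 0, "pointer_select") ∈ pvRows)).not.mpr hm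
            have e2 := (pvMem pre _ _ 1 (by simp [pvRows] :
                ("pointer_interaction", 1, "pointer_activate") ∈ pvRows)).not.mpr hm
            simp [pvRows, e1, e2, List.foldl]
          · have e1 := (pvMem pre _ _ 0 (by simp [pvRows] :
                ("navigation_interaction", 0, "navigate_focus") ∈ pvRows)).not.mpr hm
            simp [pvRows, e1]
          · have e1 := (pvMem pre _ _ 0 (by simp [pvRows] :
                ("confirm_interaction", 0, "confirm") ∈ pvRows)).not.mpr hm
            simp [pvRows, e1]
          · have e1 := (pvMem pre _ _ 0 (by simp [pvRows] :
                ("state_transform_interaction", 0, "probe_relation") ∈ pvRows)).not.mpr hm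
            simp [pvRows, e1]
        · -- pairwise: re-derive via pvS_new's construction
          rw [hs, List.pairwise_append]
          refine ⟨ihb, ?_, ?_⟩
          · rcases h0 with h1 | h1 | h1 | h1 <;> rw [h1] <;> simp [pvRows]
          · intro x hx y hy
            have hxk : x.1 < 2 * pre.length := by
              have := pvK_key_lt (pre.map pvNorm) x
                (((PySem.List.sorted_perm _ _ _)).mem_iff.mp hx)
              simpa [List.length_map] using this
            obtain ⟨r, -, hry⟩ := List.mem_map.mp hy
            rw [← hry]
            simp only
            omega
    · -- not a family (including the empty string): nothing changes on either side
      push_neg at h0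
      obtain ⟨h1, h2, h3, h4⟩ := h0
      have hs : pvS (pre ++ [c]) = pvS pre := by
        apply pvS_unchanged pre c
        right
        intro r hrr
        fin_cases hrr <;> simp only [← hn] <;>
          [exact fun h => h1 h.symm; exact fun h => h1 h.symm; exact fun h => h2 h.symm;
           exact fun h => h3 h.symm; exact fun h => h4 h.symm]
      have hstep : pvStepA ((pvS pre).map Prod.snd) c = (pvS pre).map Prod.snd := by
        unfold pvStepA
        rw [← hn]
        by_cases he : n = ""
        · simp [he]
        · simp [he, h1, h2, h3, h4]
      exact ⟨by rw [hs, hfoldl, ← iha, hstep], by rw [hs]; exact ihb⟩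

-- ===== VERDICT (by name: the statement is the Claim_ definition above) =====
theorem generic_actions_from_families_py_spec : Claim_equal_generic_actions_from_families_py := by
  intro families _
  unfold Spec_generic_actions_from_families_py generic_actions_from_families_py
  rw [pvAlt_eq, (pvInv families).1]
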